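-- pv_equiv track=rewrite | github.com/GuoJiatao/OrcaGym | tutorial/FrankaPanda-RL/FrankaMocapMultiAgents.py | generate_env_list
-- ===== SOURCE A (Python) =====
-- def generate_env_list(orcagym_addresses, subenv_num):
--     orcagym_addr_list = []
--     env_index_list = []
--     render_remote_list = []
--
--     for orcagym_addr in orcagym_addresses:
--         for i in range(subenv_num):
--             orcagym_addr_list.append(orcagym_addr)
--             env_index_list.append(i)
--             render_remote_list.append(True if i == 0 else False)
--
--     return orcagym_addr_list, env_index_list, render_remote_list
-- ===== SOURCE B (Python) =====
-- def generate_env_list(orcagym_addresses, subenv_num):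
--     if subenv_num <= 0:
--         return [], [], []
--     total = len(orcagym_addresses) * subenv_num
--     pairs = [(j // subenv_num, j % subenv_num) for j in range(total)]
--     return ([orcagym_addresses[q] for q, _ in pairs],
--             [r for _, r in pairs],
--             [r == 0 for _, r in pairs])
-- ===== Notes on version B (the rewrite author's own statement) =====
-- stated objective: alternative
-- what changed: Replaces A's nested loop over addresses and range(subenv_num) by a single flat index space 0..len*subenv_num-1: each output element is computed from the flat index j by divmod (address = addresses[j // subenv_num], env index = j % subenv_num, render flag = j % subenv_num == 0), so the nested iteration disappears entirely.
import Mathlib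
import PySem

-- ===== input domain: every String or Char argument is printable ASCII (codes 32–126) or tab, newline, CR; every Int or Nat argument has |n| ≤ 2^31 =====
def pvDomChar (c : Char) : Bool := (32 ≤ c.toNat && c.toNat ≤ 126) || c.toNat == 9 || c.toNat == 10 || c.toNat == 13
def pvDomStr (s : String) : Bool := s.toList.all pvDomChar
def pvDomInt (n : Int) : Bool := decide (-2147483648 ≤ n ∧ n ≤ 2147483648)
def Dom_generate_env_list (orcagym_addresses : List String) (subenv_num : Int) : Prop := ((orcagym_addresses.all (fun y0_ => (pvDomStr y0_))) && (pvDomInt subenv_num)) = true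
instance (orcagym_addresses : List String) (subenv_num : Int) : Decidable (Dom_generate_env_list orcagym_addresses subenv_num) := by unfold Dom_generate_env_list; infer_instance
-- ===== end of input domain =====

-- B replaces A's nested loop by one flat index space decoded with divmod; objective: alternative (same cost, different algorithm).

-- ===== PORT A =====
-- literal port of A: one pass over the addresses, inner pass over range(subenv_num),
-- appending one element to each of the three accumulators per inner step
def generate_env_list (orcagym_addresses : List String) (subenv_num : Int) : List String × List Int × List Bool :=
  orcagym_addresses.foldl
    (fun st orcagym_addr =>
      (PySem.List.pyRange 0 subenv_num 1).foldl
        (fun st i =>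
          (st.1 ++ [orcagym_addr], st.2.1 ++ [i], st.2.2 ++ [if i == 0 then true else false]))
        st)
    ([], [], [])

-- ===== PORT B =====
-- the 'pairs' comprehension of Source B: divmod of every flat index j in range(len*subenv_num)
def pvPairs (len n : Int) : List (Int × Int) :=
  (PySem.List.pyRange 0 (len * n) 1).map (fun j => (PySem.Int.floordiv j n, PySem.Int.mod j n))

-- literal port of Source B: each element derived from the flat index j by j // subenv_num
-- (address position, provably in range, so pyGetD's default is never used) and j % subenv_num
def generate_env_list_alt (orcagym_addresses : List String) (subenv_num : Int) : List String × List Int × List Bool :=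
  if subenv_num ≤ 0 then ([], [], [])
  else
    ((pvPairs orcagym_addresses.length subenv_num).map
       (fun p => PySem.List.pyGetD orcagym_addresses p.1 ""),
     (pvPairs orcagym_addresses.length subenv_num).map (fun p => p.2),
     (pvPairs orcagym_addresses.length subenv_num).map (fun p => p.2 == 0))

-- ===== PRECONDITION & SPEC =====
def Spec_generate_env_list (orcagym_addresses : List String) (subenv_num : Int) (out : List String × List Int × List Bool) : Prop := out = generate_env_list_alt orcagym_addresses subenv_num
instance (orcagym_addresses : List String) (subenv_num : Int) (out : List String × List Int × List Bool) : Decidable (Spec_generate_env_list orcagym_addresses subenv_num out) := by unfold Spec_generate_env_list; infer_instance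

-- ===== CLAIM =====
def Claim_equal_generate_env_list : Prop := ∀ (orcagym_addresses : List String) (subenv_num : Int), Dom_generate_env_list orcagym_addresses subenv_num → Spec_generate_env_list orcagym_addresses subenv_num (generate_env_list orcagym_addresses subenv_num)

-- ===== LEMMAS AND PROOFS =====

-- A's inner loop over any row l appends one per-address block to each accumulator
theorem inner_fold_eq (addr : String) (l : List Int) (st : List String × List Int × List Bool) :
    l.foldl
      (fun st i => (st.1 ++ [addr], st.2.1 ++ [i], st.2.2 ++ [if i == 0 then true else false]))
      st
    = (st.1 ++ l.map (fun _ => addr), st.2.1 ++ l,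
       st.2.2 ++ l.map (fun i => if i == 0 then true else false)) := by
  induction l generalizing st with
  | nil => simp
  | cons x xs ih => rw [List.foldl_cons, ih]; simp

-- A's whole nested loop, as three per-address block constructions
theorem outer_fold_eq (addrs : List String) (n : Int) (st : List String × List Int × List Bool) :
    addrs.foldl
      (fun st orcagym_addr =>
        (PySem.List.pyRange 0 n 1).foldl
          (fun st i =>
            (st.1 ++ [orcagym_addr], st.2.1 ++ [i], st.2.2 ++ [if i == 0 then true else false]))
          st)
      st
    = (st.1 ++ addrs.flatMap (fun a => (PySem.List.pyRange 0 n 1).map (fun _ => a)),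
       st.2.1 ++ (List.replicate addrs.length (PySem.List.pyRange 0 n 1)).flatten,
       st.2.2 ++ (List.replicate addrs.length
         ((PySem.List.pyRange 0 n 1).map (fun i => if i == 0 then true else false))).flatten) := by
  induction addrs generalizing st with
  | nil => simp
  | cons a rest ih => rw [List.foldl_cons, inner_fold_eq, ih]; simp [List.replicate_succ]

-- flat index divmod decomposition, Nat level
theorem range_mul_divmod (m k : Nat) :
    (List.range (k * m)).map (fun j => (j / m, j % m))
    = (List.range k).flatMap (fun q => (List.range m).map (fun r => (q, r))) := by
  induction k with
  | zero => simp
  | succ k ih =>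
    have h : (k + 1) * m = k * m + m := by ring
    rw [h, List.range_add, List.map_append, ih, List.range_succ, List.flatMap_append]
    congr 1
    simp only [List.flatMap_cons, List.flatMap_nil, List.append_nil, List.map_map]
    apply List.map_congr_left
    intro r hr
    have hrm : r < m := List.mem_range.mp hr
    have hd : (k * m + r) / m = k := by
      rw [Nat.add_comm, Nat.mul_comm, Nat.add_mul_div_left _ _ (by omega)]
      simp [Nat.div_eq_of_lt hrm]
    have hmod : (k * m + r) % m = r := by
      rw [Nat.add_comm, Nat.mul_comm, Nat.add_mul_mod_self_left, Nat.mod_eq_of_lt hrm]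
    simp [Function.comp, hd, hmod]

-- the pair list of port B, in block form (0 < n)
theorem pairs_eq (k : Nat) (n : Int) (hn : 0 < n) :
    pvPairs (k : Int) n
    = (List.range k).flatMap
        (fun (q : Nat) => (PySem.List.pyRange 0 n 1).map (fun r => ((q : Int), r))) := by
  have hm : n = ((n.toNat : Nat) : Int) := by omega
  unfold pvPairs
  rw [PySem.List.pyRange_one 0 ((k : Int) * n), List.map_map]
  have ht : (((k : Int) * n - 0).toNat) = k * n.toNat := by
    rw [Int.sub_zero]
    conv_lhs => rw [hm]
    rw [← Nat.cast_mul, Int.toNat_natCast]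
  rw [ht]
  have step1 : (List.range (k * n.toNat)).map
        ((fun j => (PySem.Int.floordiv j n, PySem.Int.mod j n)) ∘ (fun j : Nat => (0 : Int) + (j : Int)))
      = ((List.range (k * n.toNat)).map (fun j => (j / n.toNat, j % n.toNat))).map
          (fun p => ((p.1 : Int), (p.2 : Int))) := by
    rw [List.map_map]
    apply List.map_congr_left
    intro j _
    conv_lhs => rw [hm]
    simp only [Function.comp_def, zero_add, PySem.Int.floordiv_natCast, PySem.Int.mod_natCast]
  rw [step1, range_mul_divmod, List.map_flatMap]
  apply List.flatMap_congr
  intro q _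
  rw [List.map_map, PySem.List.pyRange_one 0 n, List.map_map]
  have hb : ((n - 0).toNat) = n.toNat := by omega
  rw [hb]
  apply List.map_congr_left
  intro r _
  simp only [Function.comp_def, zero_add]

-- a flatMap over positions equals the flatMap over the list itself
theorem flatMap_range_getD {α β : Type} (l : List α) (d : α) (g : α → List β) :
    (List.range l.length).flatMap (fun q => g (l.getD q d)) = l.flatMap g := by
  induction l with
  | nil => simp
  | cons a rest ih =>
    rw [List.length_cons, List.range_succ_eq_map, List.flatMap_cons, List.flatMap_map,
        List.flatMap_cons]
    simp only [List.getD_cons_zero, List.getD_cons_succ, Nat.succ_eq_add_one, Function.comp_def]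
    rw [ih]

-- a flatMap of a constant block is a flattened replication
theorem flatMap_const_range {β : Type} (k : Nat) (L : List β) :
    (List.range k).flatMap (fun _ => L) = (List.replicate k L).flatten := by
  rw [List.flatMap_def, List.map_const', List.length_range]

-- ===== VERDICT =====
theorem generate_env_list_spec : Claim_equal_generate_env_list := by
  intro addrs n _
  show generate_env_list addrs n = generate_env_list_alt addrs n
  unfold generate_env_list generate_env_list_alt
  rw [outer_fold_eq]
  by_cases hn : n ≤ 0
  · rw [if_pos hn, PySem.List.pyRange_one_eq_nil hn]; simp
  · rw [if_neg hn]
    have hn' : 0 < n := by omega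
    rw [pairs_eq addrs.length n hn']
    simp only [List.nil_append, List.map_flatMap, List.map_map, Function.comp_def]
    refine Prod.ext ?_ (Prod.ext ?_ ?_) <;> dsimp only
    · rw [← flatMap_range_getD addrs "" (fun a => (PySem.List.pyRange 0 n 1).map (fun _ => a))]
      apply List.flatMap_congr
      intro q _
      apply List.map_congr_left
      intro r _
      simp only [PySem.List.pyGetD_natCast]
    · rw [← flatMap_const_range addrs.length]
      apply List.flatMap_congr
      intro q _
      exact (List.map_id' _).symm
    · rw [← flatMap_const_range addrs.length]
      apply List.flatMap_congr
      intro q _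
      apply List.map_congr_left
      intro r _
      by_cases h : r == 0 <;> simp [h]
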